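-- pv_equiv track=rewrite | github.com/powderluv/baybridge | src/baybridge/frontend.py | _compact_flat_coord
-- ===== SOURCE A (Python) =====
-- from math import prod
--
-- def _compact_flat_coord(linear_index: int, shape: tuple[int, ...]) -> tuple[int, ...]:
--     if not shape:
--         return ()
--     coords: list[int] = []
--     remaining = linear_index
--     for axis in range(len(shape) - 1):
--         stride = prod(shape[axis + 1 :])
--         coords.append(remaining // stride)
--         remaining %= stride
--     coords.append(remaining)
--     return tuple(coords)
-- ===== SOURCE B (Python) =====
-- def _compact_flat_coord(linear_index, shape):
--     if not shape:
--         return ()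
--     # one reverse pass: suffix strides as a running product
--     strides = [1] * len(shape)
--     for i in range(len(shape) - 2, -1, -1):
--         strides[i] = strides[i + 1] * shape[i + 1]
--     coords = []
--     remaining = linear_index
--     for s in strides[:-1]:
--         c, remaining = divmod(remaining, s)
--         coords.append(c)
--     coords.append(remaining)
--     return tuple(coords)
-- ===== Notes on version B (the rewrite author's own statement) =====
-- stated objective: faster
-- what changed: A recomputes the suffix product prod(shape[axis+1:]) from scratch for every axis (quadratic); B builds all suffix strides in one reverse running-product pass and then does a single divmod pass.
import Mathlib
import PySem

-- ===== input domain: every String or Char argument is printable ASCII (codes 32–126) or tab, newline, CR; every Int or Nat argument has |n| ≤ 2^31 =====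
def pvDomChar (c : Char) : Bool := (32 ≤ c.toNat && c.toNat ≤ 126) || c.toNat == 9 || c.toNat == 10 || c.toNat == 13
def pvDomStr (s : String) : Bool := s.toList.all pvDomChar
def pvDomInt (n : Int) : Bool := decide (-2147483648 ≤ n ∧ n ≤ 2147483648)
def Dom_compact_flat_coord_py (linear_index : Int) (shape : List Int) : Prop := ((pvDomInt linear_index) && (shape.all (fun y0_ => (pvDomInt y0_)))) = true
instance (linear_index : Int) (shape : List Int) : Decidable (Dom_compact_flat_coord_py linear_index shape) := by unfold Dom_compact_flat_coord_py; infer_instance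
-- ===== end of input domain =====

-- B replaces A's per-axis suffix-product recomputation (O(n^2)) by one reverse running-product pass over the shape (O(n)); return values are identical.

-- ===== PORT A =====
def compact_flat_coord_py (linear_index : Int) (shape : List Int) : List Int :=
  if shape = [] then []
  else
    let st := (PySem.List.pyRange 0 ((shape.length : Int) - 1) 1).foldl
      (fun (st : List Int × Int) axis =>
        let stride := (PySem.List.slice shape (some (axis + 1)) none).foldl (· * ·) 1
        (st.1 ++ [PySem.Int.floordiv st.2 stride], PySem.Int.mod st.2 stride))
      ([], linear_index)
    st.1 ++ [st.2]

-- ===== PORT B =====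
-- strides[i] = strides[i+1] * shape[i+1], built right-to-left (the Python reverse loop)
def pvBStrides : List Int → List Int
  | [] => []
  | [_] => [1]
  | _ :: b :: t =>
      let s := pvBStrides (b :: t)
      (s.headI * b) :: s

-- the forward loop: divmod by each stride of strides[:-1], then append the remainder
def pvBDivLoop : Int → List Int → List Int
  | r, [] => [r]
  | r, s :: rest => PySem.Int.floordiv r s :: pvBDivLoop (PySem.Int.mod r s) rest

def compact_flat_coord_py_alt (linear_index : Int) (shape : List Int) : List Int :=
  if shape = [] then []
  else pvBDivLoop linear_index (pvBStrides shape).dropLast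

-- ===== PRECONDITION & SPEC =====
-- Pre_ excludes exactly the inputs where Python A raises ZeroDivisionError (a zero in shape[1:]
-- makes some suffix-product stride zero); Python B raises there too.
def Pre_compact_flat_coord_py (linear_index : Int) (shape : List Int) : Prop :=
  ∀ x ∈ shape.drop 1, x ≠ 0
instance (linear_index : Int) (shape : List Int) : Decidable (Pre_compact_flat_coord_py linear_index shape) := by unfold Pre_compact_flat_coord_py; infer_instance

def pvWitness_compact_flat_coord_py : Int × List Int := (5, [2, 3, 4])

def Spec_compact_flat_coord_py (linear_index : Int) (shape : List Int) (out : List Int) : Prop := out = compact_flat_coord_py_alt linear_index shape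
instance (linear_index : Int) (shape : List Int) (out : List Int) : Decidable (Spec_compact_flat_coord_py linear_index shape out) := by unfold Spec_compact_flat_coord_py; infer_instance

-- ===== CLAIM (what is proved, stated in full; the proofs are below) =====
def Claim_equal_compact_flat_coord_py : Prop := ∀ (linear_index : Int) (shape : List Int), Dom_compact_flat_coord_py linear_index shape → Pre_compact_flat_coord_py linear_index shape → Spec_compact_flat_coord_py linear_index shape (compact_flat_coord_py linear_index shape)

-- ===== LEMMAS AND PROOFS =====

-- common recursive characterisation: result for shape = a :: rest, driven by rest
def pvFA : Int → List Int → List Int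
  | r, [] => [r]
  | r, b :: t =>
      let s := (b :: t).foldl (· * ·) 1
      PySem.Int.floordiv r s :: pvFA (PySem.Int.mod r s) t

theorem pv_foldl_mul (l : List Int) (a : Int) : l.foldl (· * ·) a = a * l.prod := by
  induction l generalizing a with
  | nil => simp
  | cons b t ih => simp [List.foldl_cons, ih, List.prod_cons]; ring

theorem pvBStrides_headI (b : Int) (t : List Int) :
    (pvBStrides (b :: t)).headI = t.foldl (· * ·) 1 := by
  cases t with
  | nil => simp [pvBStrides]
  | cons c u =>
    simp [pvBStrides, pvBStrides_headI c u, pv_foldl_mul]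
    ring

theorem pvBStrides_ne_nil (b : Int) (t : List Int) : pvBStrides (b :: t) ≠ [] := by
  cases t <;> simp [pvBStrides]

theorem pvB_eq_pvFA (t : List Int) : ∀ (b : Int) (L : Int),
    pvBDivLoop L (pvBStrides (b :: t)).dropLast = pvFA L t := by
  induction t with
  | nil => intro b L; simp [pvBStrides, pvBDivLoop, pvFA]
  | cons c u ih =>
    intro b L
    have hne := pvBStrides_ne_nil c u
    simp only [pvBStrides]
    rw [List.dropLast_cons_of_ne_nil hne]
    simp only [pvBDivLoop, pvFA, ih c]
    rw [pvBStrides_headI]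
    have h : u.foldl (· * ·) 1 * c = (c :: u).foldl (· * ·) 1 := by
      simp [pv_foldl_mul, List.prod_cons]; ring
    rw [h]

-- A's loop, after unfolding pyRange/slice, equals pvFA
theorem pvA_loop (rest : List Int) : ∀ (L : Int) (acc : List Int),
    ((List.range rest.length).foldl
      (fun (st : List Int × Int) k =>
        let stride := (rest.drop k).foldl (· * ·) 1
        (st.1 ++ [PySem.Int.floordiv st.2 stride], PySem.Int.mod st.2 stride))
      (acc, L)).1 ++
    [((List.range rest.length).foldl
      (fun (st : List Int × Int) k =>
        let stride := (rest.drop k).foldl (· * ·) 1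
        (st.1 ++ [PySem.Int.floordiv st.2 stride], PySem.Int.mod st.2 stride))
      (acc, L)).2] = acc ++ pvFA L rest := by
  induction rest with
  | nil => intro L acc; simp [pvFA]
  | cons b t ih =>
    intro L acc
    simp only [List.length_cons, List.range_succ_eq_map, List.foldl_cons, List.foldl_map,
      List.drop_zero, List.drop_succ_cons, one_mul]
    rw [ih (PySem.Int.mod L (t.foldl (· * ·) b)) (acc ++ [PySem.Int.floordiv L (t.foldl (· * ·) b)])]
    simp [pvFA, List.foldl_cons, one_mul, List.append_assoc]

-- ===== VERDICT (by name: the statement is the Claim_ definition above) =====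
theorem compact_flat_coord_py_spec : Claim_equal_compact_flat_coord_py := by
  intro L shape _ _
  unfold Spec_compact_flat_coord_py compact_flat_coord_py compact_flat_coord_py_alt
  cases shape with
  | nil => simp
  | cons a rest =>
    simp only [reduceCtorEq, if_false]
    rw [pvB_eq_pvFA rest a L]
    have hlen : (((a :: rest).length : Int) - 1) = (rest.length : Int) := by
      push_cast [List.length_cons]; ring
    rw [hlen, PySem.List.pyRange_one]
    simp only [Int.sub_zero, Int.toNat_natCast, List.foldl_map]
    rw [PySem.List.foldl_congr_mem (List.range rest.length)
        (fun (st : List Int × Int) (k : Nat) =>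
          (st.1 ++ [PySem.Int.floordiv st.2 ((PySem.List.slice (a :: rest) (some (0 + (k : Int) + 1)) none).foldl (· * ·) 1)],
           PySem.Int.mod st.2 ((PySem.List.slice (a :: rest) (some (0 + (k : Int) + 1)) none).foldl (· * ·) 1)))
        (fun (st : List Int × Int) (k : Nat) =>
          (st.1 ++ [PySem.Int.floordiv st.2 ((rest.drop k).foldl (· * ·) 1)],
           PySem.Int.mod st.2 ((rest.drop k).foldl (· * ·) 1)))
        ([], L)
        (by
          intro st k _
          have h0 : (0 : Int) + (k : Int) + 1 = ((k + 1 : Nat) : Int) := by push_cast; ring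
          simp only [h0, PySem.List.slice_from_natCast, List.drop_succ_cons])]
    have h := pvA_loop rest L []
    simpa using h
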